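-- pv_equiv track=rewrite | github.com/IamHimon/paper_work1 | usedCars/model2_tool.py | re_construct_block
-- ===== SOURCE A (Python) =====
-- def re_construct_block(block, greedy_label):
--     all_sinks = []
--
--     # 产生这样的结果: [[0], [1, 3], [4], [5], [6, 7], [8], [9], [10], [11]]
--     i = 0
--     while i < len(greedy_label):
--         sink = [i]
--         j = len(greedy_label)-1
--         while j >= i:
--             if greedy_label[i] == greedy_label[j]:
--                 if i != j:
--                     sink.append(j)
--                     i = j
--                     all_sinks.append(sink)
--                 else:
--                     all_sinks.append(sink)
--                 break
--             j -= 1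
--         if i == j:
--             i += 1
--     # [[0], [1, 2, 3], [4], [5], [6, 7], [8], [9], [10], [11]]
--     all_com_sinks = [[i for i in range(sink[0], sink[-1] + 1)] for sink in all_sinks]
--
--     re_blocks = []
--     re_labels = []
--     for sink in all_com_sinks:
--         b_temp = [block[i] for i in sink]
--         re_blocks.append(' '.join(b_temp))
--         l_temp = [greedy_label[i] for i in sink]
--         re_labels.append(l_temp[0])
--
--     return re_blocks, re_labels
-- ===== SOURCE B (Python) =====
-- def re_construct_block(block, greedy_label):
--     # one pass: dict of last occurrence per label, jump segment-by-segment
--     last = {lab: idx for idx, lab in enumerate(greedy_label)}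
--     re_blocks = []
--     re_labels = []
--     i = 0
--     n = len(greedy_label)
--     while i < n:
--         j = last[greedy_label[i]]
--         re_blocks.append(' '.join(block[i:j + 1]))
--         re_labels.append(greedy_label[i])
--         i = j + 1
--     return re_blocks, re_labels
-- ===== Notes on version B (the rewrite author's own statement) =====
-- stated objective: faster
-- what changed: B precomputes a dict mapping each label to its last occurrence index in one pass, then emits each merged segment with an O(1) jump and a slice, instead of A's per-position backward rescan of the whole label list and intermediate sink/range lists.
import Mathlib
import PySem

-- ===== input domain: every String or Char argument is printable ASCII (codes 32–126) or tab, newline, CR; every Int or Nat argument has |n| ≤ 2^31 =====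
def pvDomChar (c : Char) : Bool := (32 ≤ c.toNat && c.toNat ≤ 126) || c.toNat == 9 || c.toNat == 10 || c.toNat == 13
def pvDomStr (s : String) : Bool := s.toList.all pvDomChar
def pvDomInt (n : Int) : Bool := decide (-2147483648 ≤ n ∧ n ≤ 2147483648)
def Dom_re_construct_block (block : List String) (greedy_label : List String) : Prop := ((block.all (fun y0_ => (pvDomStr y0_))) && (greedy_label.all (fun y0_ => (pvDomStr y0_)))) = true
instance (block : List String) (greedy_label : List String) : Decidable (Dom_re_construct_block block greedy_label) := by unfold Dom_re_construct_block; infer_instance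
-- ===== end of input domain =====

-- B replaces A's quadratic rescans (for each block start, scan down from the end for an
-- equal label) with a dict of last-occurrence indices built once, jumping segment by segment.

-- ===== PORT A =====

-- inner `while j >= i` loop: scan j downwards for the first j with greedy_label[j] == greedy_label[i].
-- The `j ≤ i` fallback branch is unreachable for i ≤ j (at j = i the equality holds trivially,
-- exactly as in the Python, whose inner loop always breaks there).
def findJ (lab : List String) (i : Nat) (j : Nat) : Nat :=
  if lab.getD j "" = lab.getD i "" then j
  else if j ≤ i then i
  else findJ lab i (j - 1)
termination_by j
decreasing_by omega

-- the outer `while i < len(greedy_label)` loop producing all_sinks ([i] or [i, j] as in A)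
lemma le_findJ (lab : List String) (i j : Nat) : i ≤ j → i ≤ findJ lab i j := by
  induction j using Nat.strong_induction_on with
  | _ j ih =>
    intro hij
    unfold findJ
    split
    · exact hij
    · split
      · exact le_refl i
      · exact ih (j - 1) (by omega) (by omega)

def sinksA (lab : List String) (i : Nat) : List (List Nat) :=
  if h : i < lab.length then
    let j := findJ lab i (lab.length - 1)
    if hij : i ≠ j then
      [i, j] :: sinksA lab (j + 1)     -- i := j, sink appended, then i == j so i += 1
    else
      [i] :: sinksA lab (i + 1)
  else []
termination_by lab.length - i
decreasing_by
  · have := le_findJ lab i (lab.length - 1) (by omega)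
    omega
  · omega

def re_construct_block (block : List String) (greedy_label : List String) : List String × List String :=
  let all_sinks := sinksA greedy_label 0
  -- all_com_sinks = [[i for i in range(sink[0], sink[-1] + 1)] for sink in all_sinks]
  let all_com_sinks := all_sinks.map (fun s => List.range' (s.headD 0) (s.getLastD 0 + 1 - s.headD 0))
  -- the final for-loop appending to re_blocks and re_labels
  all_com_sinks.foldl
    (fun acc s =>
      let b_temp := s.map (fun k => block.getD k "")
      let l_temp := s.map (fun k => greedy_label.getD k "")
      (acc.1 ++ [PySem.Str.join " " b_temp], acc.2 ++ [l_temp.getD 0 ""]))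
    ([], [])

-- ===== PORT B =====

-- last = {lab: idx for idx, lab in enumerate(greedy_label)}
def lastDict (greedy_label : List String) : PySem.Dict String Int :=
  (PySem.List.enumerate greedy_label 0).foldl (fun d p => d.insert p.2 p.1) PySem.Dict.empty

-- the `while i < n` jump loop of B; `max (i+1) _` is only a totality guard: the dict maps
-- greedy_label[i] to its last occurrence, which is ≥ i, so the argument equals (j+1).toNat.
def loopB (block : List String) (greedy_label : List String) (d : PySem.Dict String Int) (i : Nat) :
    List String × List String :=
  if h : i < greedy_label.length then
    let j : Int := d.getD (greedy_label.getD i "") 0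
    let rest := loopB block greedy_label d (max (i + 1) ((j + 1).toNat))
    (PySem.Str.join " " (PySem.List.slice block (some (i : Int)) (some (j + 1))) :: rest.1,
     greedy_label.getD i "" :: rest.2)
  else ([], [])
termination_by greedy_label.length - i
decreasing_by omega

def re_construct_block_alt (block : List String) (greedy_label : List String) : List String × List String :=
  loopB block greedy_label (lastDict greedy_label) 0

-- ===== PRECONDITION & SPEC =====
-- A indexes block at every position below len(greedy_label) and raises IndexError when block
-- is shorter; Pre_ excludes exactly those inputs.
def Pre_re_construct_block (block : List String) (greedy_label : List String) : Prop :=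
  greedy_label.length ≤ block.length
instance (block : List String) (greedy_label : List String) : Decidable (Pre_re_construct_block block greedy_label) := by unfold Pre_re_construct_block; infer_instance

def pvWitness_re_construct_block : List String × List String :=
  (["u", "v", "w", "x"], ["a", "b", "b", "c"])

def Spec_re_construct_block (block : List String) (greedy_label : List String) (out : List String × List String) : Prop := out = re_construct_block_alt block greedy_label
instance (block : List String) (greedy_label : List String) (out : List String × List String) : Decidable (Spec_re_construct_block block greedy_label out) := by unfold Spec_re_construct_block; infer_instance

-- ===== CLAIM (what is proved, stated in full; the proofs are below) =====
def Claim_equal_re_construct_block : Prop := ∀ (block : List String) (greedy_label : List String), Dom_re_construct_block block greedy_label → Pre_re_construct_block block greedy_label → Spec_re_construct_block block greedy_label (re_construct_block block greedy_label)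


-- ===== LEMMAS AND PROOFS =====

-- index of the LAST occurrence of x in lab, if any
def lastPos (lab : List String) (x : String) : Option Nat :=
  match lab with
  | [] => none
  | y :: t =>
    match lastPos t x with
    | some k => some (k + 1)
    | none => if y = x then some 0 else none

lemma lastPos_none_spec (lab : List String) (x : String)
    (h : lastPos lab x = none) : ∀ m, m < lab.length → lab.getD m "" ≠ x := by
  induction lab with
  | nil => simp
  | cons y t ih =>
    unfold lastPos at h
    cases ht : lastPos t x with
    | some k' => rw [ht] at h; simp at h
    | none =>
      rw [ht] at h
      by_cases hyx : y = x
      · simp [hyx] at h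
      · intro m hm
        cases m with
        | zero => simpa using hyx
        | succ m' => simpa using ih ht m' (by simpa using hm)

lemma lastPos_some_spec (lab : List String) (x : String) (k : Nat)
    (h : lastPos lab x = some k) :
    k < lab.length ∧ lab.getD k "" = x ∧ ∀ m, k < m → m < lab.length → lab.getD m "" ≠ x := by
  induction lab generalizing k with
  | nil => simp [lastPos] at h
  | cons y t ih =>
    unfold lastPos at h
    cases ht : lastPos t x with
    | some k' =>
      rw [ht] at h
      simp only [Option.some.injEq] at h
      subst h
      obtain ⟨h1, h2, h3⟩ := ih k' ht
      refine ⟨by simpa using h1, by simpa using h2, ?_⟩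
      intro m hm hmlen
      cases m with
      | zero => omega
      | succ m' => simpa using h3 m' (by omega) (by simpa using hmlen)
    | none =>
      rw [ht] at h
      by_cases hyx : y = x
      · subst hyx
        simp at h
        subst h
        refine ⟨by simp, by simp, ?_⟩
        intro m hm hmlen
        cases m with
        | zero => omega
        | succ m' => simpa using lastPos_none_spec t y ht m' (by simpa using hmlen)
      · simp [hyx] at h

lemma findJ_spec (lab : List String) (i j : Nat) (hij : i ≤ j) :
    lab.getD (findJ lab i j) "" = lab.getD i "" ∧ findJ lab i j ≤ j ∧ i ≤ findJ lab i j ∧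
      ∀ m, findJ lab i j < m → m ≤ j → lab.getD m "" ≠ lab.getD i "" := by
  induction j using Nat.strong_induction_on with
  | _ j ih =>
    unfold findJ
    split
    · rename_i heq
      exact ⟨heq, le_refl j, hij, fun m h1 h2 => by omega⟩
    · rename_i hne
      split
      · -- j ≤ i and i ≤ j force j = i, where the equality branch fires: unreachable
        rename_i hji
        have : j = i := by omega
        subst this
        exact absurd rfl hne
      · rename_i hji
        obtain ⟨h1, h2, h3, h4⟩ := ih (j - 1) (by omega) (by omega)
        refine ⟨h1, by omega, h3, ?_⟩
        intro m hm1 hm2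
        by_cases hmj : m = j
        · subst hmj; exact hne
        · exact h4 m hm1 (by omega)

lemma getD_enumFold (t : List String) (s : Int) (d : PySem.Dict String Int) (x : String) (v0 : Int) :
    ((PySem.List.enumerate t s).foldl (fun d p => d.insert p.2 p.1) d).getD x v0 =
      match lastPos t x with
      | some k => s + k
      | none => d.getD x v0 := by
  induction t generalizing s d with
  | nil => simp [PySem.List.enumerate, lastPos]
  | cons y tl ih =>
    rw [PySem.List.enumerate_cons]
    simp only [List.foldl_cons]
    rw [ih]
    have hcons : lastPos (y :: tl) x =
        (match lastPos tl x with
         | some k => some (k + 1)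
         | none => if y = x then some 0 else none) := rfl
    rw [hcons]
    cases ht : lastPos tl x with
    | some k => simp only; push_cast; ring
    | none =>
      simp only
      by_cases hyx : y = x
      · subst hyx
        simp
      · simp [hyx, PySem.Dict.getD_insert]
        intro h; exact absurd h.symm hyx

-- the dict lookup at greedy_label[i] is exactly A's inner-loop result findJ lab i (n-1)
lemma lastDict_getD (lab : List String) (i : Nat) (h : i < lab.length) :
    (lastDict lab).getD (lab.getD i "") 0 = (findJ lab i (lab.length - 1) : Int) := by
  unfold lastDict
  rw [getD_enumFold]
  cases ht : lastPos lab (lab.getD i "") with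
  | none => exact absurd rfl (lastPos_none_spec lab _ ht i h)
  | some k =>
    simp only [zero_add, Nat.cast_inj]
    obtain ⟨hk1, hk2, hk3⟩ := lastPos_some_spec lab _ k ht
    obtain ⟨f1, f2, f3, f4⟩ := findJ_spec lab i (lab.length - 1) (by omega)
    rcases Nat.lt_trichotomy k (findJ lab i (lab.length - 1)) with hlt | heq | hgt
    · exact absurd f1 (hk3 _ hlt (by omega))
    · simp [heq]
    · exact absurd hk2 (f4 k hgt (by omega))

lemma foldl_pair_append {α β γ : Type} (l : List α) (f : α → β) (g : α → γ)
    (acc : List β × List γ) :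
    l.foldl (fun acc s => (acc.1 ++ [f s], acc.2 ++ [g s])) acc
      = (acc.1 ++ l.map f, acc.2 ++ l.map g) := by
  induction l generalizing acc with
  | nil => simp
  | cons a t ih => simp [ih]

lemma range'_map_getD (block : List String) (a len : Nat) (h : a + len ≤ block.length) :
    (List.range' a len).map (fun k => block.getD k "") = (block.drop a).take len := by
  apply List.ext_getElem
  · simp; omega
  · intro n h1 h2
    simp only [List.getElem_map, List.getElem_range', List.getElem_take, List.getElem_drop]
    have hn : n < len := by simp at h2; omega
    rw [List.getD_eq_getElem block "" (by omega)]
    simp only [one_mul]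

lemma main_loop (block lab : List String) (hb : lab.length ≤ block.length) (i : Nat) :
    ((sinksA lab i).map (fun s =>
        PySem.Str.join " " ((List.range' (s.headD 0) (s.getLastD 0 + 1 - s.headD 0)).map
          (fun k => block.getD k ""))),
     (sinksA lab i).map (fun s =>
        ((List.range' (s.headD 0) (s.getLastD 0 + 1 - s.headD 0)).map
          (fun k => lab.getD k "")).getD 0 ""))
      = loopB block lab (lastDict lab) i := by
  induction hn : lab.length - i using Nat.strong_induction_on generalizing i with
  | _ n ih =>
    subst hn
    rw [sinksA.eq_def, loopB.eq_def]
    by_cases h : i < lab.length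
    · simp only [dif_pos h]
      have hj := lastDict_getD lab i h
      set jA := findJ lab i (lab.length - 1) with hjA
      obtain ⟨f1, f2, f3, f4⟩ := findJ_spec lab i (lab.length - 1) (by omega)
      rw [← hjA] at f2 f3
      have hmax : max (i + 1) (((lastDict lab).getD (lab.getD i "") 0 + 1).toNat) = jA + 1 := by
        rw [hj]; omega
      have hslice : PySem.List.slice block (some (i : Int))
          (some ((lastDict lab).getD (lab.getD i "") 0 + 1)) = (block.drop i).take (jA + 1 - i) := by
        rw [hj]
        have : ((jA : Int) + 1) = ((jA + 1 : Nat) : Int) := by push_cast; ring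
        rw [this, PySem.List.slice_natCast]
      have hrange : (List.range' i (jA + 1 - i)).map (fun k => block.getD k "")
          = (block.drop i).take (jA + 1 - i) :=
        range'_map_getD block i (jA + 1 - i) (by omega)
      have hlab : ((List.range' i (jA + 1 - i)).map (fun k => lab.getD k "")).getD 0 ""
          = lab.getD i "" := by
        have hsplit : jA + 1 - i = (jA - i) + 1 := by omega
        rw [hsplit, List.range'_succ]
        simp
      have hrec := ih (lab.length - (jA + 1)) (by omega) (jA + 1) rfl
      by_cases hij : i ≠ jA
      · simp only [dif_pos hij, List.map_cons, List.headD_cons, List.getLastD_cons,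
          List.getLastD_nil, hmax, hslice, hrange, hlab, ← hrec]
      · rw [not_not] at hij
        rw [← hij] at hmax hslice hrange hlab hrec
        simp only [dif_neg (not_not_intro hij), List.map_cons, List.headD_cons,
          List.getLastD_cons, List.getLastD_nil, hmax, hslice, hrange, hlab, ← hrec]
    · simp only [dif_neg h]
      simp

-- ===== VERDICT (by name: the statement is the Claim_ definition above) =====
theorem re_construct_block_spec : Claim_equal_re_construct_block := by
  intro block lab _ hpre
  unfold Spec_re_construct_block re_construct_block re_construct_block_alt
  rw [foldl_pair_append]
  simpa [List.map_map] using main_loop block lab hpre 0
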